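-- pv_equiv track=rewrite | github.com/spooky-book/ciphers | make_word_patterns.py | create_word_pattern
-- ===== SOURCE A (Python) =====
-- def create_word_pattern(word):
-- 	word = word.strip()
-- 	word_pattern = ""
-- 	i = 0
-- 	seen = {}	#dictionary
-- 	for letter in word:
-- 		if letter in seen:
-- 			word_pattern += seen[letter]
-- 		else:
-- 			seen[letter] = str(i)
-- 			word_pattern += str(i)
-- 			i += 1
--
-- 	return word_pattern
-- ===== SOURCE B (Python) =====
-- def create_word_pattern(word):
-- 	word = word.strip()
-- 	# The pattern code of a letter equals the number of distinct letters that
-- 	# appear strictly before its first occurrence; compute each digit directly.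
-- 	return ''.join(str(len(set(word[:word.index(ch)]))) for ch in word)
-- ===== Notes on version B (the rewrite author's own statement) =====
-- stated objective: alternative
-- what changed: B removes A's sequential state machine (seen-dict plus running counter built while emitting): it computes each letter's code independently and statelessly as len(set(word[:word.index(ch)])), the number of distinct letters before that letter's first occurrence, and joins the codes; correct because A assigns codes in first-occurrence order, so a letter's code equals exactly that distinct-prefix count.
import Mathlib
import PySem

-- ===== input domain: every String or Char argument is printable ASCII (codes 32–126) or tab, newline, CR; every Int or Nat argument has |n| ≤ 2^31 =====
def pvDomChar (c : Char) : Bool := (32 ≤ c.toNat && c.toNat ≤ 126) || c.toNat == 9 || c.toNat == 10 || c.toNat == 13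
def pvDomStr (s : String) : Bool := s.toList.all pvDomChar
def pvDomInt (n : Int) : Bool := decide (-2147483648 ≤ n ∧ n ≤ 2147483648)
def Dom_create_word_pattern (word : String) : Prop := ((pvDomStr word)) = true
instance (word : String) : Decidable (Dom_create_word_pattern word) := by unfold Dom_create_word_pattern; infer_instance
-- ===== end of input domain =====

-- B drops A's seen-dictionary/counter state machine entirely: each letter's code is computed
-- independently as the number of distinct letters before its first occurrence (alternative algorithm).

-- ===== PORT A =====
-- the for-loop over the stripped word with state (word_pattern, i, seen)
def aLoop (rest : List Char) (acc : List Char) (i : Int)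
    (seen : PySem.Dict Char (List Char)) : List Char :=
  match rest with
  | [] => acc
  | letter :: rest =>
    match seen.get? letter with
    | some v => aLoop rest (acc ++ v) i seen
    | none => aLoop rest (acc ++ PySem.Int.toChars i) (i + 1)
        (seen.insert letter (PySem.Int.toChars i))

def create_word_pattern (word : String) : String :=
  String.ofList (aLoop (PySem.Chars.strip word.toList) [] 0 PySem.Dict.empty)

-- ===== PORT B =====
-- str(len(set(word[:word.index(ch)]))); word.index(ch) always succeeds since ch ∈ word
def bDigit (w : List Char) (c : Char) : List Char :=
  PySem.Int.toChars (PySem.Set.len (PySem.Set.ofList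
    (PySem.List.slice w none (some (((PySem.List.index? w c).getD 0 : Nat) : Int)))))

def create_word_pattern_alt (word : String) : String :=
  let w := PySem.Chars.strip word.toList
  String.ofList (PySem.Chars.join [] (w.map (bDigit w)))

-- ===== PRECONDITION & SPEC =====
def Spec_create_word_pattern (word : String) (out : String) : Prop := out = create_word_pattern_alt word
instance (word : String) (out : String) : Decidable (Spec_create_word_pattern word out) := by unfold Spec_create_word_pattern; infer_instance

-- ===== CLAIM (what is proved, stated in full; the proofs are below) =====
def Claim_equal_create_word_pattern : Prop := ∀ (word : String), Dom_create_word_pattern word → Spec_create_word_pattern word (create_word_pattern word)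

-- ===== LEMMAS AND PROOFS =====

-- the first-occurrence index string of c in the distinct list u
def gIdx (u : List Char) (c : Char) : List Char :=
  PySem.Int.toChars (((PySem.List.index? u c).getD 0 : Nat) : Int)

lemma join_nil_eq_flatten (ps : List (List Char)) :
    PySem.Chars.join [] ps = ps.flatten := by
  match ps with
  | [] => simp [PySem.Chars.join_nil]
  | [a] => simp [PySem.Chars.join_singleton]
  | a :: b :: rest =>
    rw [PySem.Chars.join_cons_cons]
    simp [join_nil_eq_flatten (b :: rest)]

lemma aLoop_spec (rest : List Char) (d acc : List Char)
    (seen : PySem.Dict Char (List Char)) (hnd : d.Nodup)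
    (hseen : ∀ c, seen.get? c =
      if c ∈ d then some (gIdx d c) else none) :
    aLoop rest acc (d.length : Int) seen
      = acc ++ (rest.map (gIdx (PySem.Set.update d rest))).flatten := by
  induction rest generalizing d acc seen with
  | nil => simp [aLoop, PySem.Set.update_nil]
  | cons c rest ih =>
    have hupd : ∀ (u rest' : List Char), ∃ t, PySem.Set.update u rest' = u ++ t :=
      fun u rest' => ⟨List.filter (fun y => !(PySem.Set.contains u y)) (PySem.Set.ofList rest'),
        PySem.Set.update_eq_append_filter u rest'⟩
    by_cases hc : c ∈ d
    · -- seen branch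
      have hidx : PySem.List.index? (PySem.Set.update d (c :: rest)) c
          = PySem.List.index? d c := by
        obtain ⟨t, ht⟩ := hupd d (c :: rest)
        rw [ht, PySem.List.index?_append_of_mem t hc]
      have hset : PySem.Set.update d (c :: rest) = PySem.Set.update d rest := by
        rw [PySem.Set.update_cons, PySem.Set.add_of_mem hc]
      simp only [aLoop, hseen c, if_pos hc]
      rw [ih d (acc ++ gIdx d c) seen hnd hseen, hset]
      simp only [List.map_cons, List.flatten_cons, ← hset]
      have : gIdx (PySem.Set.update d (c :: rest)) c = gIdx d c := by
        simp only [gIdx]; rw [hidx]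
      rw [this, List.append_assoc]
    · -- new-letter branch
      have hadd : PySem.Set.add d c = d ++ [c] := PySem.Set.add_of_not_mem hc
      have hnd' : (d ++ [c]).Nodup := by
        simp [List.nodup_append, hnd]
        intro a ha h
        exact hc (h ▸ ha)
      have hidxc : PySem.List.index? (d ++ [c]) c = some d.length :=
        PySem.List.index?_append_singleton_self d c hc
      have hseen' : ∀ c', (seen.insert c (PySem.Int.toChars (d.length : Int))).get? c'
          = if c' ∈ d ++ [c] then some (gIdx (d ++ [c]) c') else none := by
        intro c'
        by_cases hcc : c' = c
        · rw [hcc, PySem.Dict.get?_insert_self]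
          have hc' : c ∈ d ++ [c] := by simp
          rw [if_pos hc']
          simp only [gIdx]; rw [hidxc]; rfl
        · rw [PySem.Dict.get?_insert_of_ne _ _ hcc, hseen c']
          by_cases hmem : c' ∈ d
          · have hmem' : c' ∈ d ++ [c] := by simp [hmem]
            rw [if_pos hmem, if_pos hmem']
            have : PySem.List.index? (d ++ [c]) c' = PySem.List.index? d c' :=
              PySem.List.index?_append_of_mem [c] hmem
            simp only [gIdx]; rw [this]
          · have hmem' : c' ∉ d ++ [c] := by simp [hmem, hcc]
            rw [if_neg hmem, if_neg hmem']
      have hcast : (d.length : Int) + 1 = ((d ++ [c]).length : Nat) := by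
        simp
      simp only [aLoop, hseen c, if_neg hc]
      rw [hcast, ih (d ++ [c]) _ _ hnd' hseen']
      have hset : PySem.Set.update d (c :: rest) = PySem.Set.update (d ++ [c]) rest := by
        rw [PySem.Set.update_cons, hadd]
      rw [← hset]
      have hgc : gIdx (PySem.Set.update d (c :: rest)) c
          = PySem.Int.toChars (d.length : Int) := by
        obtain ⟨t, ht⟩ := hupd (d ++ [c]) rest
        rw [hset, ht]
        have : PySem.List.index? ((d ++ [c]) ++ t) c = some d.length := by
          rw [PySem.List.index?_append_of_mem t (by simp), hidxc]
        simp only [gIdx]; rw [this]; rfl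
      simp only [List.map_cons, List.flatten_cons, ← hgc]
      rw [List.append_assoc]

lemma bDigit_eq (w : List Char) (c : Char) (hc : c ∈ w) :
    bDigit w c = gIdx (PySem.List.dedup w) c := by
  obtain ⟨k, hk⟩ : ∃ k, PySem.List.index? w c = some k :=
    Option.isSome_iff_exists.1 ((PySem.List.index?_isSome_iff w c).2 hc)
  obtain ⟨pre, suf, hw, hlen, hpre⟩ := (PySem.List.index?_eq_some_iff w c k).1 hk
  have hcu : c ∉ PySem.Set.ofList pre := fun h => hpre ((PySem.Set.mem_ofList pre c).1 h)
  have htake : w.take k = pre := by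
    rw [hw, ← hlen]
    exact List.take_left
  have hidx : PySem.List.index? (PySem.List.dedup w) c
      = some (PySem.Set.ofList pre).length := by
    have ht := PySem.Set.update_eq_append_filter (PySem.Set.ofList pre ++ [c]) suf
    rw [PySem.List.dedup_eq_ofList, hw, PySem.Set.ofList_append, PySem.Set.update_cons,
      PySem.Set.add_of_not_mem hcu, ht, PySem.List.index?_append_of_mem _ (by simp),
      PySem.List.index?_append_singleton_self _ c hcu]
  simp only [bDigit, gIdx, hk, hidx, Option.getD_some]
  rw [PySem.List.slice_to_natCast, htake]
  simp [PySem.Set.len]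

lemma main_eq (w : List Char) :
    aLoop w [] 0 PySem.Dict.empty
      = PySem.Chars.join [] (w.map (bDigit w)) := by
  have hA := aLoop_spec w [] [] PySem.Dict.empty List.nodup_nil
    (by intro c; simp [PySem.Dict.get?_empty])
  simp only [List.length_nil, Nat.cast_zero, List.nil_append] at hA
  rw [hA, join_nil_eq_flatten]
  rw [PySem.Set.update_nil_left]
  refine congrArg List.flatten (List.map_congr_left fun c hc => ?_).symm
  rw [bDigit_eq w c hc]
  simp

-- ===== VERDICT (by name: the statement is the Claim_ definition above) =====
theorem create_word_pattern_spec : Claim_equal_create_word_pattern := by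
  intro word _
  unfold Spec_create_word_pattern create_word_pattern create_word_pattern_alt
  exact congrArg String.ofList (main_eq (PySem.Chars.strip word.toList))
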